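-- pv_equiv track=rewrite | github.com/EvgeniyLukashevich/PythonIntro | homework/seminar04_hw/Task03.py | UniqueIntList
-- ===== SOURCE A (Python) =====
-- def UniqueIntList(list1):
--     sequence =''.join(list(map(str, list1)))
--     dict = {}
--     result = []
--
--     for c in sequence:
--         if dict.get(c):
--             dict[c] += 1
--         else: dict[c] = 1
--
--     for i in dict.items():
--         if i[1] == 1:
--             result.append(int(i[0]))
--
--     return result
-- ===== SOURCE B (Python) =====
-- def UniqueIntList(list1):
--     sequence = ''.join(map(str, list1))
--     once = []      # chars seen exactly once so far, in first-occurrence order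
--     more = set()   # chars seen at least twice
--     for c in sequence:
--         if c in more:
--             continue
--         if c in once:
--             once.remove(c)
--             more.add(c)
--         else:
--             once.append(c)
--     return [int(c) for c in once]
-- ===== Notes on version B (the rewrite author's own statement) =====
-- stated objective: alternative
-- what changed: Replaced counting (dict of counts then items-filter) by the classic first-unique single pass that never counts: it maintains an ordered 'once' list and a 'more' set, moving a char from once to more on its second sighting, so once ends up holding exactly the count-1 characters in first-occurrence order.
import Mathlib
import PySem

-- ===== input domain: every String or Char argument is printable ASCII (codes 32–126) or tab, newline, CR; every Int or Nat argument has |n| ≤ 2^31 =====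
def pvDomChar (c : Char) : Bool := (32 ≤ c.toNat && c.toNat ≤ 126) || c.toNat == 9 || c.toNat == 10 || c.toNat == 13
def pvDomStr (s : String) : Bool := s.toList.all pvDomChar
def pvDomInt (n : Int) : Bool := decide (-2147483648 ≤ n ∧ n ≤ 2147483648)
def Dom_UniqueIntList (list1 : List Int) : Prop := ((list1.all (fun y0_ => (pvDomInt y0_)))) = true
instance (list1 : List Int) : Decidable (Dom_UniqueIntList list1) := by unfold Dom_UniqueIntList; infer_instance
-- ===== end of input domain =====

-- B replaces A's counting (dict of counts, then an items-filter pass) by the classic first-unique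
-- single pass that never counts: an ordered 'once' list and a 'more' set, a char moving from once
-- to more at its second sighting (alternative decomposition, no speed claim).

-- ===== PORT A =====
-- int(i[0]) / int(c) on a one-char string; none (Python's ValueError on '-') only outside Pre_
def pvIntOfChar (c : Char) : Int := (PySem.Int.ofStr? (String.ofList [c])).getD 0

def UniqueIntList (list1 : List Int) : List Int :=
  let sequence : String := PySem.Str.join "" (list1.map PySem.Int.toStr)
  let dict : PySem.Dict Char Int :=
    sequence.toList.foldl
      (fun d c => if d.getD c 0 ≠ 0 then d.insert c (d.getD c 0 + 1) else d.insert c 1)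
      PySem.Dict.empty
  dict.items.foldl (fun result i => if i.2 == 1 then result ++ [pvIntOfChar i.1] else result) []

-- ===== PORT B =====
-- the body of B's for-loop: skip if already in 'more'; on second sighting move once → more; else record in once
def pvStep (st : List Char × PySem.Set Char) (c : Char) : List Char × PySem.Set Char :=
  if PySem.Set.contains st.2 c then st
  else if st.1.contains c then ((PySem.List.remove? st.1 c).getD st.1, PySem.Set.add st.2 c)
  else (st.1 ++ [c], st.2)

def UniqueIntList_alt (list1 : List Int) : List Int :=
  let sequence : String := PySem.Str.join "" (list1.map PySem.Int.toStr)
  let st := sequence.toList.foldl pvStep ([], PySem.Set.empty)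
  st.1.map pvIntOfChar

-- ===== PRECONDITION & SPEC =====
-- Pre_ excludes exactly the lists with a single negative number: there the joined string
-- contains '-' exactly once, so BOTH Pythons raise ValueError on int('-').
def Pre_UniqueIntList (list1 : List Int) : Prop := (list1.filter (fun n => n < 0)).length ≠ 1
instance (list1 : List Int) : Decidable (Pre_UniqueIntList list1) := by unfold Pre_UniqueIntList; infer_instance
def pvWitness_UniqueIntList : List Int := [12, 321, 44]

def Spec_UniqueIntList (list1 : List Int) (out : List Int) : Prop := out = UniqueIntList_alt list1
instance (list1 : List Int) (out : List Int) : Decidable (Spec_UniqueIntList list1 out) := by unfold Spec_UniqueIntList; infer_instance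

-- ===== CLAIM =====
def Claim_equal_UniqueIntList : Prop := ∀ (list1 : List Int), Dom_UniqueIntList list1 → Pre_UniqueIntList list1 → Spec_UniqueIntList list1 (UniqueIntList list1)

-- ===== LEMMAS AND PROOFS =====

-- A's dict loop (branching on the truthiness of dict.get(c)) is the counter loop:
-- in the else-branch the stored value is 0-or-absent, so inserting 1 is inserting getD+1.
theorem pv_foldl_eq_counter_fold (l : List Char) (d : PySem.Dict Char Int) :
    l.foldl (fun d c => if d.getD c 0 ≠ 0 then d.insert c (d.getD c 0 + 1) else d.insert c 1) d
      = l.foldl (fun d c => d.insert c (d.getD c 0 + 1)) d := by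
  induction l generalizing d with
  | nil => rfl
  | cons c t ih =>
    rw [List.foldl_cons, List.foldl_cons]
    have hstep : (if d.getD c 0 ≠ 0 then d.insert c (d.getD c 0 + 1) else d.insert c 1)
        = d.insert c (d.getD c 0 + 1) := by
      by_cases h : d.getD c 0 = 0 <;> simp [h]
    rw [hstep, ih]

-- the items-filter over the counter is the count==1 filter over the distinct characters
theorem pv_core (cs : List Char) :
    ((PySem.Dict.counter cs).items.foldl
        (fun result (i : Char × Int) => if i.2 == 1 then result ++ [pvIntOfChar i.1] else result) [])
      = ((PySem.Set.ofList cs).filter (fun c => cs.count c == 1)).map pvIntOfChar := by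
  rw [PySem.List.foldl_append_if (fun i : Char × Int => i.2 == 1) (fun i : Char × Int => pvIntOfChar i.1)]
  rw [PySem.Dict.items_counter, List.nil_append, List.filter_map, List.map_map]
  have hp : List.filter ((fun i : Char × Int => i.2 == 1) ∘ fun k => (k, (cs.count k : Int))) (PySem.Set.ofList cs)
      = List.filter (fun c => cs.count c == 1) (PySem.Set.ofList cs) := by
    apply List.filter_congr
    intro x _
    simp [Function.comp]
  rw [hp]
  rfl

-- invariant of B's single pass: after processing prefix p, 'once' is the insertion-ordered
-- list of prefix characters of prefix-count 1, and 'more' contains exactly those of count ≥ 2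
theorem pv_inv (l : List Char) : ∀ (p once : List Char) (more : PySem.Set Char),
    once = (PySem.Set.ofList p).filter (fun c => p.count c == 1) →
    (∀ c, PySem.Set.contains more c = true ↔ 2 ≤ p.count c) →
    (l.foldl pvStep (once, more)).1
      = (PySem.Set.ofList (p ++ l)).filter (fun c => (p ++ l).count c == 1) := by
  induction l with
  | nil => intro p once more honce hmore; simpa using honce
  | cons c t ih =>
    intro p once more honce hmore
    have hassoc : p ++ c :: t = (p ++ [c]) ++ t := by simp
    rw [List.foldl_cons, hassoc]
    have hcnt_ne : ∀ x, x ≠ c → (p ++ [c]).count x = p.count x := by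
      intro x hx; simp [List.count_append, List.count_eq_zero, hx]
    have hcnt_c : (p ++ [c]).count c = p.count c + 1 := by simp
    by_cases h2 : 2 ≤ p.count c
    · -- already seen twice: skip
      have hm : PySem.Set.contains more c = true := (hmore c).mpr h2
      have hcm : c ∈ more := (PySem.Set.contains_iff more c).mp hm
      have hstep : pvStep (once, more) c = (once, more) := by simp [pvStep, hcm]
      rw [hstep]
      apply ih (p ++ [c]) once more
      · rw [honce]
        have hofl : PySem.Set.ofList (p ++ [c]) = PySem.Set.ofList p := by
          rw [PySem.Set.ofList_append_singleton, PySem.Set.add_of_mem]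
          rw [PySem.Set.mem_ofList]
          exact List.count_pos_iff.mp (by omega)
        rw [hofl]
        apply List.filter_congr
        intro x _
        by_cases hx : x = c
        · subst hx; simp; omega
        · rw [hcnt_ne x hx]
      · intro x
        by_cases hx : x = c
        · subst hx; rw [hcnt_c]; constructor <;> intro _ <;> [omega; exact (hmore x).mpr h2]
        · rw [hcnt_ne x hx]; exact hmore x
    · have hm : PySem.Set.contains more c = false := by
        rcases Bool.eq_false_or_eq_true (PySem.Set.contains more c) with ht | hf
        · exact absurd ((hmore c).mp ht) h2
        · exact hf
      have hcm : c ∉ more := by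
        intro hmem
        have h := (PySem.Set.contains_iff more c).mpr hmem
        rw [hm] at h; cases h
      have hnodup : once.Nodup := honce ▸ (PySem.Set.nodup_ofList p).filter _
      by_cases h1 : p.count c = 1
      · -- second sighting: move c from once to more
        have hcin : c ∈ once := by
          rw [honce, List.mem_filter, PySem.Set.mem_ofList]
          refine ⟨List.count_pos_iff.mp (by omega), by simp [h1]⟩
        have hcont : once.contains c = true := by simpa using hcin
        have hstep : pvStep (once, more) c
            = ((PySem.List.remove? once c).getD once, PySem.Set.add more c) := by
          simp [pvStep, hcm, hcin]
        rw [hstep]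
        apply ih (p ++ [c])
        · rw [PySem.List.remove?_eq_some_erase once c hcin, Option.getD_some,
              List.Nodup.erase_eq_filter hnodup, honce, List.filter_filter]
          have hofl : PySem.Set.ofList (p ++ [c]) = PySem.Set.ofList p := by
            rw [PySem.Set.ofList_append_singleton, PySem.Set.add_of_mem]
            rw [PySem.Set.mem_ofList]
            exact List.count_pos_iff.mp (by omega)
          rw [hofl]
          apply List.filter_congr
          intro x _
          by_cases hx : x = c
          · subst hx; simp [hcnt_c, h1]
          · rw [hcnt_ne x hx]; simp [hx]
        · intro x
          by_cases hx : x = c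
          · subst hx
            rw [hcnt_c, h1]
            constructor
            · intro _; omega
            · intro _
              have hmem : x ∈ PySem.Set.add more x := by rw [PySem.Set.mem_add]; right; rfl
              exact (PySem.Set.contains_iff _ x).mpr hmem
          · rw [hcnt_ne x hx]
            rw [show (PySem.Set.contains (PySem.Set.add more c) x = true) ↔ x ∈ PySem.Set.add more c
                  from PySem.Set.contains_iff _ _]
            rw [PySem.Set.mem_add]
            constructor
            · rintro (hmem | rfl)
              · exact (hmore x).mp ((PySem.Set.contains_iff _ _).mpr hmem)
              · exact absurd rfl hx
            · intro hc
              left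
              exact (PySem.Set.contains_iff _ _).mp ((hmore x).mpr hc)
      · -- first sighting: record c in once
        have h0 : p.count c = 0 := by omega
        have hcnot : c ∉ p := List.count_eq_zero.mp h0
        have hcout : c ∉ once := by
          rw [honce, List.mem_filter, PySem.Set.mem_ofList]
          rintro ⟨hc, _⟩; exact hcnot hc
        have hcont : once.contains c = false := by simpa using hcout
        have hstep : pvStep (once, more) c = (once ++ [c], more) := by
          simp [pvStep, hcm, hcout]
        rw [hstep]
        apply ih (p ++ [c])
        · have hofl : PySem.Set.ofList (p ++ [c]) = PySem.Set.ofList p ++ [c] := by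
            rw [PySem.Set.ofList_append_singleton, PySem.Set.add_of_not_mem]
            rw [PySem.Set.mem_ofList]
            exact hcnot
          rw [hofl, List.filter_append, honce]
          congr 1
          · apply List.filter_congr
            intro x hx
            have hxc : x ≠ c := by
              rintro rfl
              exact hcnot ((PySem.Set.mem_ofList p x).mp hx)
            rw [hcnt_ne x hxc]
          · simp [h0]
        · intro x
          by_cases hx : x = c
          · subst hx
            rw [hcnt_c, h0, hm]
            constructor <;> intro h <;> [exact absurd h (by simp); omega]
          · rw [hcnt_ne x hx]; exact hmore x

-- B's pass computes the insertion-ordered count==1 characters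
theorem pv_alt_core (cs : List Char) :
    (cs.foldl pvStep ([], PySem.Set.empty)).1
      = (PySem.Set.ofList cs).filter (fun c => cs.count c == 1) := by
  have h := pv_inv cs [] [] PySem.Set.empty (by simp) (by intro c; simp [PySem.Set.empty, PySem.Set.contains])
  simp at h; exact h

-- ===== VERDICT (by name: the statement is the Claim_ definition above) =====
theorem UniqueIntList_spec : Claim_equal_UniqueIntList := by
  intro list1 _ _
  unfold Spec_UniqueIntList UniqueIntList UniqueIntList_alt
  simp only []
  rw [pv_foldl_eq_counter_fold]
  rw [PySem.Dict.foldl_insert_getD_add_one_eq_counter]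
  rw [pv_core, pv_alt_core]
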